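-- pv_equiv track=rewrite | github.com/lsfusion/platform | server/src/samphighl/main.py | getCodeFragment
-- ===== SOURCE A (Python) =====
-- specialCommentPrefix = '//#'
--
-- def startFragmentComment(id):
--     return specialCommentPrefix + id
--
-- def endFragmentComment(id):
--     return specialCommentPrefix + id + ' end'
--
-- def filterLines(lines):
--     return [line for line in lines if not line.startswith(specialCommentPrefix)]
--
-- def joinLines(lines):
--     return '\n'.join(lines)
--
-- def filteredCode(lines):
--     return joinLines(filterLines(lines))
--
-- def getCodeFragment(lines, blockId):
--     filteredLines = 0
--     lineIndex = 0
--     startLine = None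
--     resultStartLine = 0
--
--     for line in lines:
--         if line.startswith(specialCommentPrefix):
--             filteredLines += 1
--             if line.strip() == endFragmentComment(blockId):
--                 return filteredCode(lines[startLine:lineIndex]), resultStartLine
--             elif line.strip() == startFragmentComment(blockId) and startLine is None:
--                 startLine = lineIndex + 1
--                 resultStartLine = startLine - filteredLines + 1
--         lineIndex += 1
--
--     if startLine is not None:
--         return filteredCode(lines[startLine:]), resultStartLine
--     else:
--         return None, None
-- ===== SOURCE B (Python) =====
-- specialCommentPrefix = '//#'
--
-- def getCodeFragment(lines, blockId):
--     prefix = specialCommentPrefix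
--     startMarker = prefix + blockId
--     endMarker = prefix + blockId + ' end'
--
--     def isMarker(line, text):
--         return line.startswith(prefix) and line.strip() == text
--
--     startIdx = next((i for i, l in enumerate(lines)
--                      if isMarker(l, startMarker)), None)
--     if startIdx is None:
--         return None, None
--
--     body = lines[startIdx + 1:]
--     endOffset = next((i for i, l in enumerate(body)
--                       if isMarker(l, endMarker)), None)
--     fragment = body if endOffset is None else body[:endOffset]
--
--     resultStartLine = sum(1 for l in lines[:startIdx + 1]
--                           if not l.startswith(prefix)) + 1
--     return '\n'.join(l for l in fragment if not l.startswith(prefix)), resultStartLine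
-- ===== Notes on version B (the rewrite author's own statement) =====
-- stated objective: simpler
-- what changed: A's single loop threading four accumulators (filteredLines/lineIndex/startLine/resultStartLine) is replaced by locating the first start marker, then the first end marker after it, slicing out the fragment and counting non-comment lines up to the start marker for the start line.
-- intended difference: On inputs whose first end-marker line '//#<id> end' has no start marker strictly before it, A returns all comment-filtered lines preceding that end marker with start line 0 (an accident of slicing lines[None:i] with the initial resultStartLine=0), while B returns (None, None) if there is no start marker and otherwise the fragment after the start marker with its real start line, the intended fragment-between-markers semantics. — e.g. on getCodeFragment(["//#x end"], "x"): A returns (some "", some 0), B returns (none, none)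
import Mathlib
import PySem

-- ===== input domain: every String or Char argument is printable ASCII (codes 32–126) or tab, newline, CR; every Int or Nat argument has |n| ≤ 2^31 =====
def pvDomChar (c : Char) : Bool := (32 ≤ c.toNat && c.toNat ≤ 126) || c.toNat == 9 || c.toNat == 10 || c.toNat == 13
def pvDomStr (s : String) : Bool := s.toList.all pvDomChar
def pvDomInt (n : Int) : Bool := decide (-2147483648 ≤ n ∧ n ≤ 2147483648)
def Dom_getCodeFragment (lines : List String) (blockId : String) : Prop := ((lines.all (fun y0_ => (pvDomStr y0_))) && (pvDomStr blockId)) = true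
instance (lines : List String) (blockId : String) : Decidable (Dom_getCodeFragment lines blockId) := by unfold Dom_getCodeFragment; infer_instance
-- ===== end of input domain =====

-- B replaces A's single stateful scan (filteredLines/startLine/resultStartLine accumulators)
-- by locating the start marker, then the end marker after it, and slicing (objective: simpler);
-- where the first end marker has no start marker before it A and B intentionally differ (D_ below).

-- ===== PORT A =====
def pvSpecialCommentPrefix : String := "//#"

def pvStartFragmentComment (id : String) : String := pvSpecialCommentPrefix ++ id

def pvEndFragmentComment (id : String) : String := pvSpecialCommentPrefix ++ id ++ " end"

def pvFilterLines (lines : List String) : List String :=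
  lines.filter (fun line => !(PySem.Str.startswith line pvSpecialCommentPrefix))

def pvFilteredCode (lines : List String) : String :=
  PySem.Str.join "\n" (pvFilterLines lines)

-- the 'for line in lines' loop of A, carrying its four state variables
def pvLoopA (lines : List String) (blockId : String) :
    List String → Int → Int → Option Int → Int → Option String × Option Int
  | [], _, _, startLine, resultStartLine =>
      match startLine with
      | some s => (some (pvFilteredCode (PySem.List.slice lines (some s) none)), some resultStartLine)
      | none => (none, none)
  | line :: rest, filteredLines, lineIndex, startLine, resultStartLine =>
      if PySem.Str.startswith line pvSpecialCommentPrefix then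
        let filteredLines := filteredLines + 1
        if PySem.Str.strip line == pvEndFragmentComment blockId then
          (some (pvFilteredCode (PySem.List.slice lines startLine (some lineIndex))), some resultStartLine)
        else if (PySem.Str.strip line == pvStartFragmentComment blockId) && startLine.isNone then
          pvLoopA lines blockId rest filteredLines (lineIndex + 1) (some (lineIndex + 1))
            ((lineIndex + 1) - filteredLines + 1)
        else
          pvLoopA lines blockId rest filteredLines (lineIndex + 1) startLine resultStartLine
      else
        pvLoopA lines blockId rest filteredLines (lineIndex + 1) startLine resultStartLine

def getCodeFragment (lines : List String) (blockId : String) : Option String × Option Int :=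
  pvLoopA lines blockId lines 0 0 none 0

-- ===== PORT B =====
-- Source B's isMarker(line, text) helper (prefix is the module constant)
def pvIsMarker (line text : String) : Bool :=
  PySem.Str.startswith line pvSpecialCommentPrefix && (PySem.Str.strip line == text)

-- Source B's final "'\n'.join(l for l in fragment if not l.startswith(prefix))"
def pvJoinFiltered (fragment : List String) : String :=
  PySem.Str.join "\n" (fragment.filter (fun l => !(PySem.Str.startswith l pvSpecialCommentPrefix)))

def getCodeFragment_alt (lines : List String) (blockId : String) : Option String × Option Int :=
  match lines.findIdx? (fun l => pvIsMarker l (pvSpecialCommentPrefix ++ blockId)) with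
  | none => (none, none)
  | some startIdx =>
      let body := PySem.List.slice lines (some ((startIdx : Int) + 1)) none
      let fragment :=
        match body.findIdx? (fun l => pvIsMarker l (pvSpecialCommentPrefix ++ blockId ++ " end")) with
        | none => body
        | some endOffset => PySem.List.slice body none (some ((endOffset : Int)))
      let resultStartLine : Int :=
        (((lines.take (startIdx + 1)).countP
            (fun l => !(PySem.Str.startswith l pvSpecialCommentPrefix)) : Nat) : Int) + 1
      (some (pvJoinFiltered fragment), some resultStartLine)

-- ===== PRECONDITION & SPEC =====
-- On inputs whose first end-marker line has no start marker strictly before it, A returns all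
-- comment-filtered lines preceding that end marker with start line 0 (an accident of slicing
-- lines[None:i] with the initial resultStartLine), while B returns (None, None) when there is no
-- start marker at all and otherwise the fragment following the start marker — the intended
-- "fragment between the markers" semantics.
def D_getCodeFragment (lines : List String) (blockId : String) : Prop :=
  (match lines.findIdx? (fun l => PySem.Str.startswith l pvSpecialCommentPrefix
                                    && (PySem.Str.strip l == pvEndFragmentComment blockId)),
         lines.findIdx? (fun l => PySem.Str.startswith l pvSpecialCommentPrefix
                                    && (PySem.Str.strip l == pvStartFragmentComment blockId)) with
   | some e, some s => decide (e ≤ s)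
   | some _, none => true
   | none, _ => false) = true
instance (lines : List String) (blockId : String) : Decidable (D_getCodeFragment lines blockId) := by unfold D_getCodeFragment; infer_instance

def Spec_getCodeFragment (lines : List String) (blockId : String) (out : Option String × Option Int) : Prop := ¬ D_getCodeFragment lines blockId → out = getCodeFragment_alt lines blockId
instance (lines : List String) (blockId : String) (out : Option String × Option Int) : Decidable (Spec_getCodeFragment lines blockId out) := by unfold Spec_getCodeFragment; infer_instance

def pvDiffWitness_getCodeFragment : List String × String := (["//#x end"], "x")
def pvDiffWitnessOut_getCodeFragment : (Option String × Option Int) × (Option String × Option Int) :=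
  ((some "", some 0), (none, none))

-- ===== CLAIM (what is proved, stated in full; the proofs are below) =====
def Claim_unchanged_getCodeFragment : Prop := ∀ (lines : List String) (blockId : String), Dom_getCodeFragment lines blockId → Spec_getCodeFragment lines blockId (getCodeFragment lines blockId)
def Claim_changed_getCodeFragment : Prop := Dom_getCodeFragment (pvDiffWitness_getCodeFragment.1) (pvDiffWitness_getCodeFragment.2) ∧ D_getCodeFragment (pvDiffWitness_getCodeFragment.1) (pvDiffWitness_getCodeFragment.2) ∧ getCodeFragment (pvDiffWitness_getCodeFragment.1) (pvDiffWitness_getCodeFragment.2) = pvDiffWitnessOut_getCodeFragment.1 ∧ getCodeFragment_alt (pvDiffWitness_getCodeFragment.1) (pvDiffWitness_getCodeFragment.2) = pvDiffWitnessOut_getCodeFragment.2 ∧ pvDiffWitnessOut_getCodeFragment.1 ≠ pvDiffWitnessOut_getCodeFragment.2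
def Claim_exact_getCodeFragment : Prop := ∀ (lines : List String) (blockId : String), Dom_getCodeFragment lines blockId → D_getCodeFragment lines blockId → getCodeFragment lines blockId ≠ getCodeFragment_alt lines blockId

-- ===== LEMMAS AND PROOFS =====

-- A's result, written as a case analysis over the first marker positions (proved below to equal
-- getCodeFragment; used only by the proofs)
def pvOldStartLine (lines : List String) (startIdx : Nat) : Int :=
  ((startIdx : Int) + 1) -
    (((lines.take (startIdx + 1)).countP (fun l => PySem.Str.startswith l pvSpecialCommentPrefix) : Nat) : Int) + 1

def pvScanResult (lines : List String) (blockId : String) : Option String × Option Int :=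
  let startIdx := lines.findIdx? (fun l => pvIsMarker l (pvSpecialCommentPrefix ++ blockId))
  let endIdx := lines.findIdx? (fun l => pvIsMarker l (pvSpecialCommentPrefix ++ blockId ++ " end"))
  match endIdx with
  | some e =>
      match startIdx with
      | some s =>
          if s < e then
            (some (pvJoinFiltered ((lines.drop (s + 1)).take (e - (s + 1)))),
             some (pvOldStartLine lines s))
          else
            (some (pvJoinFiltered (lines.take e)), some 0)
      | none => (some (pvJoinFiltered (lines.take e)), some 0)
  | none =>
      match startIdx with
      | some s =>
          (some (pvJoinFiltered (lines.drop (s + 1))), some (pvOldStartLine lines s))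
      | none => (none, none)

-- D_'s marker tests written through A's comment helpers coincide with Source B's isMarker (definitional)
lemma pvD_iff (lines : List String) (blockId : String) :
    D_getCodeFragment lines blockId ↔
      (match lines.findIdx? (fun l => pvIsMarker l (pvSpecialCommentPrefix ++ blockId ++ " end")),
             lines.findIdx? (fun l => pvIsMarker l (pvSpecialCommentPrefix ++ blockId)) with
       | some e, some s => decide (e ≤ s)
       | some _, none => true
       | none, _ => false) = true := Iff.rfl

-- a line cannot be both the start marker and the end marker (different lengths)
lemma pv_not_both (blockId line : String) :
    pvIsMarker line (pvSpecialCommentPrefix ++ blockId) = true →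
    pvIsMarker line (pvSpecialCommentPrefix ++ blockId ++ " end") = true → False := by
  simp only [pvIsMarker, Bool.and_eq_true, beq_iff_eq]
  rintro ⟨_, h1⟩ ⟨_, h2⟩
  have h3 := congrArg String.length (h1.symm.trans h2)
  simp only [String.length_append] at h3
  have h4 : (" end" : String).length = 4 := by decide
  omega

lemma pv_findIdx?_snoc {α : Type} (xs : List α) (x : α) (p : α → Bool) :
    (xs ++ [x]).findIdx? p = (xs.findIdx? p).or (if p x then some xs.length else none) := by
  rw [List.findIdx?_append]
  cases h : xs.findIdx? p <;> simp [List.findIdx?_cons]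

lemma pvFilteredCode_eq (xs : List String) : pvFilteredCode xs = pvJoinFiltered xs := rfl

-- one unfolding step of A's loop
lemma pvLoopA_cons (lines : List String) (blockId l : String) (rest : List String)
    (f i : Int) (st : Option Int) (r : Int) :
    pvLoopA lines blockId (l :: rest) f i st r =
      if PySem.Str.startswith l pvSpecialCommentPrefix = true then
        (if (PySem.Str.strip l == pvEndFragmentComment blockId) = true then
          (some (pvFilteredCode (PySem.List.slice lines st (some i))), some r)
        else if ((PySem.Str.strip l == pvStartFragmentComment blockId) && st.isNone) = true then
          pvLoopA lines blockId rest (f + 1) (i + 1) (some (i + 1)) ((i + 1) - (f + 1) + 1)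
        else pvLoopA lines blockId rest (f + 1) (i + 1) st r)
      else pvLoopA lines blockId rest f (i + 1) st r := rfl

-- evaluation of pvScanResult when the first end marker is at e and no start marker precedes it
lemma pvScan_eval_end (lines : List String) (blockId : String) (e : Nat)
    (hE : lines.findIdx? (fun l => pvIsMarker l (pvSpecialCommentPrefix ++ blockId ++ " end")) = some e)
    (h : ∀ s : Nat, lines.findIdx? (fun l => pvIsMarker l (pvSpecialCommentPrefix ++ blockId)) = some s → ¬ s < e) :
    pvScanResult lines blockId = (some (pvJoinFiltered (lines.take e)), some 0) := by
  unfold pvScanResult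
  rw [hE]
  cases hs : lines.findIdx? (fun l => pvIsMarker l (pvSpecialCommentPrefix ++ blockId)) with
  | none => rfl
  | some s => simp [h s hs]

-- evaluation of pvScanResult when the first start marker is at s, before the first end marker at e
lemma pvScan_eval_end_start (lines : List String) (blockId : String) (e s : Nat)
    (hE : lines.findIdx? (fun l => pvIsMarker l (pvSpecialCommentPrefix ++ blockId ++ " end")) = some e)
    (hS : lines.findIdx? (fun l => pvIsMarker l (pvSpecialCommentPrefix ++ blockId)) = some s)
    (hlt : s < e) :
    pvScanResult lines blockId
      = (some (pvJoinFiltered ((lines.drop (s + 1)).take (e - (s + 1)))),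
         some (pvOldStartLine lines s)) := by
  unfold pvScanResult
  rw [hE, hS]
  simp [hlt]

-- the loop invariant: A's running state is determined by the prefix 'done' already scanned
lemma pvLoopA_spec (blockId : String) :
    ∀ (rest done : List String) (st : Option Int) (r : Int),
      done.findIdx? (fun l => pvIsMarker l (pvSpecialCommentPrefix ++ blockId ++ " end")) = none →
      ((st = none ∧ done.findIdx? (fun l => pvIsMarker l (pvSpecialCommentPrefix ++ blockId)) = none ∧ r = 0) ∨
       (∃ s : Nat, done.findIdx? (fun l => pvIsMarker l (pvSpecialCommentPrefix ++ blockId)) = some s ∧ s < done.length ∧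
          st = some ((s : Int) + 1) ∧ r = pvOldStartLine done s)) →
      pvLoopA (done ++ rest) blockId rest
          ((done.countP (fun l => PySem.Str.startswith l pvSpecialCommentPrefix) : Nat) : Int)
          ((done.length : Nat) : Int) st r
        = pvScanResult (done ++ rest) blockId := by
  intro rest
  induction rest with
  | nil =>
    intro done st r hE hS
    rw [List.append_nil]
    rcases hS with ⟨hst, hfs, hr⟩ | ⟨s, hfs, hlt, hst, hr⟩
    · subst hst hr
      simp only [pvLoopA, pvScanResult, hE, hfs]
    · subst hst hr
      have hc : ((s : Int) + 1) = (((s + 1 : Nat) : Int)) := by push_cast; ring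
      simp only [pvLoopA, pvScanResult, hE, hfs, hc, PySem.List.slice_from_natCast,
        pvFilteredCode_eq]
  | cons l rs ih =>
    intro done st r hE hS
    have hx : done ++ l :: rs = (done ++ [l]) ++ rs := by simp
    by_cases hp : PySem.Str.startswith l pvSpecialCommentPrefix = true
    · by_cases he : (PySem.Str.strip l == pvEndFragmentComment blockId) = true
      · -- l is the first end marker: both sides return here
        have hEl : pvIsMarker l (pvSpecialCommentPrefix ++ blockId ++ " end") = true := by
          unfold pvIsMarker
          rw [hp, Bool.true_and]
          exact he
        have hendIdx : (done ++ l :: rs).findIdx?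
            (fun l => pvIsMarker l (pvSpecialCommentPrefix ++ blockId ++ " end")) = some done.length := by
          rw [List.findIdx?_append, hE]
          simp [List.findIdx?_cons, hEl]
        have hSl : pvIsMarker l (pvSpecialCommentPrefix ++ blockId) = false := by
          by_contra hcon
          exact pv_not_both blockId l (by simpa using hcon) hEl
        have hLoopRet : pvLoopA (done ++ l :: rs) blockId (l :: rs)
            ((done.countP (fun l => PySem.Str.startswith l pvSpecialCommentPrefix) : Nat) : Int)
            ((done.length : Nat) : Int) st r
            = (some (pvFilteredCode (PySem.List.slice (done ++ l :: rs) st (some ((done.length : Nat) : Int)))), some r) := by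
          rw [pvLoopA_cons, if_pos hp, if_pos he]
        rcases hS with ⟨hst, hfs, hr⟩ | ⟨s, hfs, hlt, hst, hr⟩
        · subst hst hr
          have htake : (done ++ l :: rs).take done.length = done := by
            simp [List.take_left (l₁ := done) (l₂ := l :: rs)]
          rw [hLoopRet, PySem.List.slice_to_natCast, htake, pvFilteredCode_eq]
          rw [pvScan_eval_end (done ++ l :: rs) blockId done.length hendIdx ?_, htake]
          intro s hs
          rw [List.findIdx?_append, hfs] at hs
          simp only [Option.none_or, List.findIdx?_cons, hSl, Bool.false_eq_true, if_false,
            Option.map_map] at hs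
          obtain ⟨k, hk, rfl⟩ := Option.map_eq_some_iff.mp hs
          simp only [Function.comp_apply]
          omega
        · subst hst hr
          have hstartIdx : (done ++ l :: rs).findIdx?
              (fun l => pvIsMarker l (pvSpecialCommentPrefix ++ blockId)) = some s := by
            rw [List.findIdx?_append, hfs]; rfl
          have htake : (done ++ l :: rs).take (s + 1) = done.take (s + 1) :=
            List.take_append_of_le_length (by omega)
          have hc : ((s : Int) + 1) = (((s + 1 : Nat) : Int)) := by push_cast; ring
          have hslice : PySem.List.slice (done ++ l :: rs) (some ((s : Int) + 1))
              (some ((done.length : Nat) : Int))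
              = ((done ++ l :: rs).drop (s + 1)).take (done.length - (s + 1)) := by
            rw [hc, PySem.List.slice_natCast]
          rw [hLoopRet, hslice, pvFilteredCode_eq]
          rw [pvScan_eval_end_start (done ++ l :: rs) blockId done.length s hendIdx hstartIdx hlt]
          unfold pvOldStartLine
          rw [htake]
      · -- l is a '//#' line but not the end marker
        have hEl : pvIsMarker l (pvSpecialCommentPrefix ++ blockId ++ " end") = false := by
          unfold pvIsMarker
          rw [hp, Bool.true_and]
          exact Bool.eq_false_iff.mpr he
        have hE' : ((done ++ [l]).findIdx?
            (fun l => pvIsMarker l (pvSpecialCommentPrefix ++ blockId ++ " end"))) = none := by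
          rw [pv_findIdx?_snoc, hE]; simp [hEl]
        have hcount : (((done ++ [l]).countP (fun l => PySem.Str.startswith l pvSpecialCommentPrefix) : Nat) : Int)
            = ((done.countP (fun l => PySem.Str.startswith l pvSpecialCommentPrefix) : Nat) : Int) + 1 := by
          rw [List.countP_append]
          simp only [List.countP_cons, List.countP_nil, hp, if_true, Nat.zero_add]
          push_cast
          ring
        have hlen : (((done ++ [l]).length : Nat) : Int) = ((done.length : Nat) : Int) + 1 := by
          simp
        by_cases hs2 : ((PySem.Str.strip l == pvStartFragmentComment blockId) && st.isNone) = true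
        · -- first start marker found here
          obtain ⟨hs3, hs4⟩ := Bool.and_eq_true_iff.mp hs2
          have hst0 : st = none := Option.isNone_iff_eq_none.mp hs4
          subst hst0
          have hSl : pvIsMarker l (pvSpecialCommentPrefix ++ blockId) = true := by
            unfold pvIsMarker
            rw [hp, Bool.true_and]
            exact hs3
          rcases hS with ⟨_, hfs, hr⟩ | ⟨s, _, _, hst, _⟩
          · subst hr
            have hS' : ((done ++ [l]).findIdx? (fun l => pvIsMarker l (pvSpecialCommentPrefix ++ blockId)))
                = some done.length := by
              rw [pv_findIdx?_snoc, hfs]; simp [hSl]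
            have hrec := ih (done ++ [l]) (some (((done.length : Nat) : Int) + 1))
              (pvOldStartLine (done ++ [l]) done.length) hE'
              (Or.inr ⟨done.length, hS', by simp, rfl, rfl⟩)
            rw [← hx] at hrec
            have hstep : pvLoopA (done ++ l :: rs) blockId (l :: rs)
                ((done.countP (fun l => PySem.Str.startswith l pvSpecialCommentPrefix) : Nat) : Int)
                ((done.length : Nat) : Int) none 0
                = pvLoopA (done ++ l :: rs) blockId rs
                    (((done.countP (fun l => PySem.Str.startswith l pvSpecialCommentPrefix) : Nat) : Int) + 1)
                    (((done.length : Nat) : Int) + 1)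
                    (some (((done.length : Nat) : Int) + 1))
                    ((((done.length : Nat) : Int) + 1) - (((done.countP (fun l => PySem.Str.startswith l pvSpecialCommentPrefix) : Nat) : Int) + 1) + 1) := by
              rw [pvLoopA_cons, if_pos hp, if_neg he, if_pos hs2]
            have hreq : pvOldStartLine (done ++ [l]) done.length
                = (((done.length : Nat) : Int) + 1)
                  - (((done.countP (fun l => PySem.Str.startswith l pvSpecialCommentPrefix) : Nat) : Int) + 1) + 1 := by
              unfold pvOldStartLine
              rw [List.take_of_length_le (by simp), List.countP_append]
              simp only [List.countP_cons, List.countP_nil, hp, if_true, Nat.zero_add]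
              push_cast
              ring
            rw [hreq, hcount, hlen] at hrec
            rw [hstep]
            exact hrec
          · exact absurd hst (by simp)
        · -- a '//#' line that changes nothing but the filtered-line count
          have hstep : pvLoopA (done ++ l :: rs) blockId (l :: rs)
              ((done.countP (fun l => PySem.Str.startswith l pvSpecialCommentPrefix) : Nat) : Int)
              ((done.length : Nat) : Int) st r
              = pvLoopA (done ++ l :: rs) blockId rs
                  (((done.countP (fun l => PySem.Str.startswith l pvSpecialCommentPrefix) : Nat) : Int) + 1)
                  (((done.length : Nat) : Int) + 1) st r := by
            rw [pvLoopA_cons, if_pos hp, if_neg he, if_neg hs2]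
          rcases hS with ⟨hst, hfs, hr⟩ | ⟨s, hfs, hlt, hst, hr⟩
          · -- no start yet: l is not the start marker either (hs2 failed with st = none)
            subst hst
            have hSl : pvIsMarker l (pvSpecialCommentPrefix ++ blockId) = false := by
              unfold pvIsMarker
              rw [hp, Bool.true_and]
              have hns : ¬ (PySem.Str.strip l == pvStartFragmentComment blockId) = true := by
                intro hcon; exact hs2 (by simp [hcon])
              simpa using hns
            have hfs' : ((done ++ [l]).findIdx? (fun l => pvIsMarker l (pvSpecialCommentPrefix ++ blockId)))
                = none := by rw [pv_findIdx?_snoc, hfs]; simp [hSl]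
            have hrec := ih (done ++ [l]) none r hE' (Or.inl ⟨rfl, hfs', hr⟩)
            rw [← hx] at hrec
            rw [hstep, ← hcount, ← hlen]
            exact hrec
          · -- start already recorded
            have hfs' : ((done ++ [l]).findIdx? (fun l => pvIsMarker l (pvSpecialCommentPrefix ++ blockId)))
                = some s := by rw [pv_findIdx?_snoc, hfs]; rfl
            have hr' : r = pvOldStartLine (done ++ [l]) s := by
              rw [hr]
              unfold pvOldStartLine
              rw [List.take_append_of_le_length (by omega)]
            have hrec := ih (done ++ [l]) st r hE'
              (Or.inr ⟨s, hfs', by simp; omega, hst, hr'⟩)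
            rw [← hx] at hrec
            rw [hstep, ← hcount, ← hlen]
            exact hrec
    · -- not a '//#' line: every accumulator is unchanged
      have hEl : pvIsMarker l (pvSpecialCommentPrefix ++ blockId ++ " end") = false := by
        unfold pvIsMarker
        rw [Bool.eq_false_iff]
        intro hcon
        exact hp (Bool.and_eq_true_iff.mp hcon).1
      have hSl : pvIsMarker l (pvSpecialCommentPrefix ++ blockId) = false := by
        unfold pvIsMarker
        rw [Bool.eq_false_iff]
        intro hcon
        exact hp (Bool.and_eq_true_iff.mp hcon).1
      have hE' : ((done ++ [l]).findIdx?
          (fun l => pvIsMarker l (pvSpecialCommentPrefix ++ blockId ++ " end"))) = none := by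
        rw [pv_findIdx?_snoc, hE]; simp [hEl]
      have hp' : PySem.Str.startswith l pvSpecialCommentPrefix = false := Bool.eq_false_iff.mpr hp
      have hcount : (((done ++ [l]).countP (fun l => PySem.Str.startswith l pvSpecialCommentPrefix) : Nat) : Int)
          = ((done.countP (fun l => PySem.Str.startswith l pvSpecialCommentPrefix) : Nat) : Int) := by
        rw [List.countP_append]
        simp only [List.countP_cons, List.countP_nil, hp', Nat.zero_add]
        simp
      have hS' : (st = none ∧ ((done ++ [l]).findIdx? (fun l => pvIsMarker l (pvSpecialCommentPrefix ++ blockId))) = none ∧ r = 0) ∨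
          (∃ s : Nat, ((done ++ [l]).findIdx? (fun l => pvIsMarker l (pvSpecialCommentPrefix ++ blockId))) = some s ∧ s < (done ++ [l]).length ∧
            st = some ((s : Int) + 1) ∧ r = pvOldStartLine (done ++ [l]) s) := by
        rcases hS with ⟨hst, hfs, hr⟩ | ⟨s, hfs, hlt, hst, hr⟩
        · exact Or.inl ⟨hst, by rw [pv_findIdx?_snoc, hfs]; simp [hSl], hr⟩
        · refine Or.inr ⟨s, by rw [pv_findIdx?_snoc, hfs]; rfl, by simp; omega, hst, ?_⟩
          rw [hr]
          unfold pvOldStartLine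
          rw [List.take_append_of_le_length (by omega)]
      have hrec := ih (done ++ [l]) st r hE' hS'
      rw [← hx] at hrec
      have hstep : pvLoopA (done ++ l :: rs) blockId (l :: rs)
          ((done.countP (fun l => PySem.Str.startswith l pvSpecialCommentPrefix) : Nat) : Int)
          ((done.length : Nat) : Int) st r
          = pvLoopA (done ++ l :: rs) blockId rs
              ((done.countP (fun l => PySem.Str.startswith l pvSpecialCommentPrefix) : Nat) : Int)
              (((done.length : Nat) : Int) + 1) st r := by
        rw [pvLoopA_cons, if_neg hp]
      have hlen : (((done ++ [l]).length : Nat) : Int) = ((done.length : Nat) : Int) + 1 := by simp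
      rw [hstep, ← hcount, ← hlen]
      exact hrec

-- A equals its marker-position case analysis on every input
lemma pvA_eq_scan (lines : List String) (blockId : String) :
    getCodeFragment lines blockId = pvScanResult lines blockId := by
  unfold getCodeFragment
  have h := pvLoopA_spec blockId lines [] none 0 (by simp) (Or.inl ⟨rfl, by simp, rfl⟩)
  simpa using h

-- both start-line formulas agree for an in-range start index
lemma pv_countP_split {α : Type} (p : α → Bool) (xs : List α) :
    xs.countP p + xs.countP (fun a => !(p a)) = xs.length := by
  induction xs with
  | nil => rfl
  | cons x t ih =>
    rw [List.countP_cons, List.countP_cons, List.length_cons, ← ih]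
    cases h : p x <;> simp <;> omega

lemma pvStartLine_eq (lines : List String) (s : Nat) (hs : s < lines.length) :
    pvOldStartLine lines s
      = (((lines.take (s + 1)).countP
            (fun l => !(PySem.Str.startswith l pvSpecialCommentPrefix)) : Nat) : Int) + 1 := by
  unfold pvOldStartLine
  have hlen : (lines.take (s + 1)).length = s + 1 := by
    rw [List.length_take]; omega
  have h := pv_countP_split (fun l => PySem.Str.startswith l pvSpecialCommentPrefix) (lines.take (s + 1))
  rw [hlen] at h
  omega

-- first match after dropping a prefix that lies before it
lemma pv_findIdx?_drop {α : Type} (l : List α) (p : α → Bool) (e k : Nat)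
    (h : l.findIdx? p = some e) (hk : k ≤ e) :
    (l.drop k).findIdx? p = some (e - k) := by
  obtain ⟨he, hp, hmin⟩ := List.findIdx?_eq_some_iff_getElem.mp h
  refine List.findIdx?_eq_some_iff_getElem.mpr ⟨?_, ?_, ?_⟩
  · rw [List.length_drop]; omega
  · have : (l.drop k)[e - k]'(by rw [List.length_drop]; omega) = l[e]'he := by
      rw [List.getElem_drop]
      congr 1
      omega
    rw [this]; exact hp
  · intro j hj
    have : (l.drop k)[j]'(by rw [List.length_drop] at *; omega) = l[k + j]'(by omega) := by
      rw [List.getElem_drop]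
    rw [this]
    exact hmin (k + j) (by omega)

-- outside D_, the marker-position case analysis computes exactly B's result
lemma pvScan_eq_alt (lines : List String) (blockId : String)
    (hD : ¬ D_getCodeFragment lines blockId) :
    pvScanResult lines blockId = getCodeFragment_alt lines blockId := by
  rw [pvD_iff] at hD
  unfold pvScanResult getCodeFragment_alt
  cases hE : lines.findIdx? (fun l => pvIsMarker l (pvSpecialCommentPrefix ++ blockId ++ " end")) with
  | none =>
    cases hS : lines.findIdx? (fun l => pvIsMarker l (pvSpecialCommentPrefix ++ blockId)) with
    | none => rfl
    | some s =>
      have hs : s < lines.length := (List.findIdx?_eq_some_iff_getElem.mp hS).1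
      have hbodyE : (lines.drop (s + 1)).findIdx?
          (fun l => pvIsMarker l (pvSpecialCommentPrefix ++ blockId ++ " end")) = none := by
        rw [List.findIdx?_eq_none_iff] at hE ⊢
        intro x hx
        exact hE x (List.mem_of_mem_drop hx)
      have hc : ((s : Int) + 1) = (((s + 1 : Nat) : Int)) := by push_cast; ring
      simp only [hc, PySem.List.slice_from_natCast, hbodyE, pvStartLine_eq lines s hs]
  | some e =>
    cases hS : lines.findIdx? (fun l => pvIsMarker l (pvSpecialCommentPrefix ++ blockId)) with
    | none => rw [hE, hS] at hD; simp at hD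
    | some s =>
      rw [hE, hS] at hD
      have hlt : s < e := by simpa using hD
      have hs : s < lines.length := (List.findIdx?_eq_some_iff_getElem.mp hS).1
      have hbodyE : (lines.drop (s + 1)).findIdx?
          (fun l => pvIsMarker l (pvSpecialCommentPrefix ++ blockId ++ " end")) = some (e - (s + 1)) :=
        pv_findIdx?_drop lines _ e (s + 1) hE (by omega)
      have hc : ((s : Int) + 1) = (((s + 1 : Nat) : Int)) := by push_cast; ring
      simp only [hlt, if_true, hc, PySem.List.slice_from_natCast, hbodyE,
        PySem.List.slice_to_natCast, pvStartLine_eq lines s hs]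

-- ===== VERDICT (by name: the statements are the Claim_ definitions above) =====
theorem getCodeFragment_spec : Claim_unchanged_getCodeFragment := by
  intro lines blockId _
  unfold Spec_getCodeFragment
  intro hD
  rw [pvA_eq_scan, pvScan_eq_alt lines blockId hD]

theorem getCodeFragment_changed : Claim_changed_getCodeFragment := by
  unfold Claim_changed_getCodeFragment; decide

theorem getCodeFragment_tight : Claim_exact_getCodeFragment := by
  intro lines blockId _ hD
  rw [pvA_eq_scan]
  rw [pvD_iff] at hD
  unfold pvScanResult getCodeFragment_alt
  cases hE : lines.findIdx? (fun l => pvIsMarker l (pvSpecialCommentPrefix ++ blockId ++ " end")) with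
  | none => rw [hE] at hD; simp at hD
  | some e =>
    cases hS : lines.findIdx? (fun l => pvIsMarker l (pvSpecialCommentPrefix ++ blockId)) with
    | none => simp
    | some s =>
      rw [hE, hS] at hD
      have hle : e ≤ s := by simpa using hD
      have hns : ¬ s < e := by omega
      simp only [hns, if_false]
      intro hcon
      have h2 := congrArg Prod.snd hcon
      simp only at h2
      have : (0 : Int) = (((lines.take (s + 1)).countP
          (fun l => !(PySem.Str.startswith l pvSpecialCommentPrefix)) : Nat) : Int) + 1 := by
        simpa using h2
      omega
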